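-- pv_equiv track=rewrite | github.com/kuc161123/bybit-telegram-bot | main.py | detect_approach_from_orders
-- ===== SOURCE A (Python) =====
-- from typing import List, Dict, Optional, Tuple
--
-- def detect_approach_from_orders(orders: List[Dict]) -> Optional[str]:
--     """
--     Detect trading approach from order patterns
--     Conservative: TP1_, TP2_, TP3_, TP4_, SL_, _LIMIT
--     Fast: _FAST_TP, _FAST_SL, TP_, SL_
--     GGShot: Similar to conservative but may have specific patterns
--     """
--     if not orders:
--         return None
--
--     conservative_patterns = ['TP1_', 'TP2_', 'TP3_', 'TP4_', '_LIMIT']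
--     fast_patterns = ['_FAST_TP', '_FAST_SL', '_FAST_MARKET']
--     ggshot_patterns = ['_GGSHOT_', 'GGShot']
--
--     conservative_count = 0
--     fast_count = 0
--     ggshot_count = 0
--     tp_count = 0
--
--     for order in orders:
--         order_link_id = order.get('orderLinkId', '')
--
--         # Check for GGShot patterns first
--         if any(pattern in order_link_id for pattern in ggshot_patterns):
--             ggshot_count += 1
--
--         # Check for conservative patterns
--         elif any(pattern in order_link_id for pattern in conservative_patterns):
--             conservative_count += 1
--
--         # Check for fast patterns
--         elif any(pattern in order_link_id for pattern in fast_patterns):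
--             fast_count += 1
--
--         # Count TPs for conservative detection
--         if order_link_id.startswith('TP') and '_' in order_link_id:
--             tp_count += 1
--
--     # Determine approach based on counts
--     if ggshot_count > 0:
--         return "ggshot"
--     elif conservative_count > 0 or tp_count >= 2:  # Multiple TPs indicate conservative
--         return "conservative"
--     elif fast_count > 0:
--         return "fast"
--
--     # Default based on order count (single TP/SL = fast, multiple = conservative)
--     tp_orders = [o for o in orders if o.get('stopOrderType') == 'TakeProfit']
--     if len(tp_orders) > 1:
--         return "conservative"
--
--     return None
-- ===== SOURCE B (Python) =====
-- from typing import List, Dict, Optional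
--
-- GGSHOT_PATTERNS = ['_GGSHOT_', 'GGShot']
-- CONSERVATIVE_PATTERNS = ['TP1_', 'TP2_', 'TP3_', 'TP4_', '_LIMIT']
-- FAST_PATTERNS = ['_FAST_TP', '_FAST_SL', '_FAST_MARKET']
--
--
-- def _matches(lid, patterns):
--     return any(p in lid for p in patterns)
--
--
-- def _is_tp(lid):
--     return lid.startswith('TP') and '_' in lid
--
--
-- def detect_approach_from_orders(orders: List[Dict]) -> Optional[str]:
--     if not orders:
--         return None
--     link_ids = [o.get('orderLinkId', '') for o in orders]
--     if any(_matches(lid, GGSHOT_PATTERNS) for lid in link_ids):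
--         return "ggshot"
--     tp_count = sum(1 for lid in link_ids if _is_tp(lid))
--     if any(_matches(lid, CONSERVATIVE_PATTERNS) for lid in link_ids) or tp_count >= 2:
--         return "conservative"
--     if any(_matches(lid, FAST_PATTERNS) for lid in link_ids):
--         return "fast"
--     if sum(1 for o in orders if o.get('stopOrderType') == 'TakeProfit') > 1:
--         return "conservative"
--     return None
-- ===== Notes on version B (the rewrite author's own statement) =====
-- stated objective: simpler
-- what changed: Replaces the single fused loop maintaining four interdependent counters (with elif exclusivity) with early-returning independent scans: each classification level does its own any()/sum() pass, exploiting that ggshot dominates everything and conservative dominates fast, so the elif exclusivity is output-irrelevant.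
import Mathlib
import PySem

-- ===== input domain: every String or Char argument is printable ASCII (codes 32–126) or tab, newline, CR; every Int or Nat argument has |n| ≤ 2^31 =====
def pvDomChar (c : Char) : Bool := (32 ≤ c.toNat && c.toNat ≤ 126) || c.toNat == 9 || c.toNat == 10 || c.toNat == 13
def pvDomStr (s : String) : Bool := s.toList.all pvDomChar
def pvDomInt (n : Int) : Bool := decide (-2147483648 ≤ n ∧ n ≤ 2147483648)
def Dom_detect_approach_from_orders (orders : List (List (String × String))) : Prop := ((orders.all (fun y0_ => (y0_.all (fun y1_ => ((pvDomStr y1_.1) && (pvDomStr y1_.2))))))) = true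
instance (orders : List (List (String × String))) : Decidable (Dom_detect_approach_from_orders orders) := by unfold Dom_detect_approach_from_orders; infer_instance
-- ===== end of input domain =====

-- B replaces A's single fused counting loop (four interdependent elif counters) with
-- early-returning independent any()/count passes per classification level; same return value.

-- shared pattern helpers (both Pythons contain the identical 'p in lid' / startswith / get tests)
def pvLinkId (order : List (String × String)) : String := PySem.Dict.getD (PySem.Dict.mk order) "orderLinkId" ""

def pvGG (lid : String) : Bool := ["_GGSHOT_", "GGShot"].any (fun p => PySem.Str.isIn p lid)

def pvCons (lid : String) : Bool := ["TP1_", "TP2_", "TP3_", "TP4_", "_LIMIT"].any (fun p => PySem.Str.isIn p lid)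

def pvFast (lid : String) : Bool := ["_FAST_TP", "_FAST_SL", "_FAST_MARKET"].any (fun p => PySem.Str.isIn p lid)

def pvTP (lid : String) : Bool := PySem.Str.startswith lid "TP" && PySem.Str.isIn "_" lid

def pvIsTakeProfit (o : List (String × String)) : Bool := PySem.Dict.get? (PySem.Dict.mk o) "stopOrderType" == some "TakeProfit"

-- ===== PORT A =====
def pvAStep (st : Nat × Nat × Nat × Nat) (order : List (String × String)) : Nat × Nat × Nat × Nat :=
  let lid := pvLinkId order
  let st1 :=
    if pvGG lid then (st.1 + 1, st.2.1, st.2.2.1, st.2.2.2)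
    else if pvCons lid then (st.1, st.2.1 + 1, st.2.2.1, st.2.2.2)
    else if pvFast lid then (st.1, st.2.1, st.2.2.1 + 1, st.2.2.2)
    else st
  if pvTP lid then (st1.1, st1.2.1, st1.2.2.1, st1.2.2.2 + 1) else st1

def detect_approach_from_orders (orders : List (List (String × String))) : Option String :=
  if orders = [] then none
  else
    let st := orders.foldl pvAStep (0, 0, 0, 0)
    if st.1 > 0 then some "ggshot"
    else if st.2.1 > 0 ∨ st.2.2.2 ≥ 2 then some "conservative"
    else if st.2.2.1 > 0 then some "fast"
    else
      let tp_orders := orders.filter pvIsTakeProfit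
      if tp_orders.length > 1 then some "conservative" else none

-- ===== PORT B =====
def detect_approach_from_orders_alt (orders : List (List (String × String))) : Option String :=
  if orders = [] then none
  else
    let linkIds := orders.map pvLinkId
    if linkIds.any pvGG then some "ggshot"
    else
      let tpCount := linkIds.countP pvTP
      if linkIds.any pvCons ∨ tpCount ≥ 2 then some "conservative"
      else if linkIds.any pvFast then some "fast"
      else if orders.countP pvIsTakeProfit > 1 then some "conservative"
      else none

-- ===== PRECONDITION & SPEC =====
def Spec_detect_approach_from_orders (orders : List (List (String × String))) (out : Option String) : Prop := out = detect_approach_from_orders_alt orders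
instance (orders : List (List (String × String))) (out : Option String) : Decidable (Spec_detect_approach_from_orders orders out) := by unfold Spec_detect_approach_from_orders; infer_instance

-- ===== CLAIM (what is proved, stated in full; the proofs are below) =====
def Claim_equal_detect_approach_from_orders : Prop := ∀ (orders : List (List (String × String))), Dom_detect_approach_from_orders orders → Spec_detect_approach_from_orders orders (detect_approach_from_orders orders)

-- ===== LEMMAS AND PROOFS =====

theorem pv_countP_pos_iff_any {α : Type} (p : α → Bool) (l : List α) :
    0 < l.countP p ↔ l.any p = true := by
  rw [Nat.pos_iff_ne_zero, Ne, List.countP_eq_zero, List.any_eq_true]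
  constructor
  · intro h
    by_contra hno
    exact h (fun a ha hpa => hno ⟨a, ha, hpa⟩)
  · rintro ⟨a, ha, hpa⟩ h
    exact h a ha hpa

-- A's fold computes the four pattern counts (with the elif exclusivity baked into the predicates)
theorem pvAStep_foldl (l : List (List (String × String))) (g c f t : Nat) :
    l.foldl pvAStep (g, c, f, t) =
      (g + (l.map pvLinkId).countP pvGG,
       c + (l.map pvLinkId).countP (fun lid => !pvGG lid && pvCons lid),
       f + (l.map pvLinkId).countP (fun lid => !pvGG lid && !pvCons lid && pvFast lid),
       t + (l.map pvLinkId).countP pvTP) := by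
  induction l generalizing g c f t with
  | nil => simp
  | cons o l ih =>
    simp only [List.foldl_cons, List.map_cons, List.countP_cons, pvAStep]
    rw [ih]
    by_cases hg : pvGG (pvLinkId o) <;> by_cases hc : pvCons (pvLinkId o) <;>
      by_cases hf : pvFast (pvLinkId o) <;> by_cases ht : pvTP (pvLinkId o) <;>
      simp [hg, hc, hf, ht] <;> omega

-- verdict is below
theorem detect_approach_from_orders_spec : Claim_equal_detect_approach_from_orders := by
  intro orders _
  unfold Spec_detect_approach_from_orders detect_approach_from_orders detect_approach_from_orders_alt
  by_cases hnil : orders = []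
  · rw [if_pos hnil, if_pos hnil]
  · rw [if_neg hnil, if_neg hnil]
    show (if (orders.foldl pvAStep (0,0,0,0)).1 > 0 then _ else _) = _
    rw [pvAStep_foldl]
    simp only [Nat.zero_add]
    by_cases hg : (orders.map pvLinkId).any pvGG
    · rw [if_pos ((pv_countP_pos_iff_any _ _).mpr hg), if_pos hg]
    · have hgg0 : (orders.map pvLinkId).countP pvGG = 0 := by
        by_contra h
        exact hg ((pv_countP_pos_iff_any _ _).mp (Nat.pos_of_ne_zero h))
      have hallg : ∀ x ∈ orders.map pvLinkId, ¬ pvGG x = true := List.countP_eq_zero.mp hgg0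
      have hcz : (orders.map pvLinkId).countP (fun lid => !pvGG lid && pvCons lid)
          = (orders.map pvLinkId).countP pvCons := by
        apply List.countP_congr
        intro x hx
        simp [eq_false_of_ne_true (hallg x hx)]
      rw [if_neg (by rw [hgg0]; omega : ¬ (orders.map pvLinkId).countP pvGG > 0), if_neg hg, hcz]
      by_cases hc : (orders.map pvLinkId).any pvCons = true ∨ (orders.map pvLinkId).countP pvTP ≥ 2
      · have hcA : (orders.map pvLinkId).countP pvCons > 0 ∨ (orders.map pvLinkId).countP pvTP ≥ 2 := by
          rcases hc with h | h
          · exact Or.inl ((pv_countP_pos_iff_any _ _).mpr h)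
          · exact Or.inr h
        rw [if_pos hcA, if_pos hc]
      · have hcA : ¬ ((orders.map pvLinkId).countP pvCons > 0 ∨ (orders.map pvLinkId).countP pvTP ≥ 2) := by
          rintro (h | h)
          · exact hc (Or.inl ((pv_countP_pos_iff_any _ _).mp h))
          · exact hc (Or.inr h)
        have hcons0 : (orders.map pvLinkId).countP pvCons = 0 := by omega
        have hallc : ∀ x ∈ orders.map pvLinkId, ¬ pvCons x = true := List.countP_eq_zero.mp hcons0
        have hfz : (orders.map pvLinkId).countP (fun lid => !pvGG lid && !pvCons lid && pvFast lid)
            = (orders.map pvLinkId).countP pvFast := by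
          apply List.countP_congr
          intro x hx
          simp [eq_false_of_ne_true (hallg x hx), eq_false_of_ne_true (hallc x hx)]
        rw [if_neg hcA, if_neg hc, hfz]
        by_cases hf : (orders.map pvLinkId).any pvFast
        · rw [if_pos ((pv_countP_pos_iff_any _ _).mpr hf), if_pos hf]
        · rw [if_neg (fun h => hf ((pv_countP_pos_iff_any _ _).mp h)), if_neg hf,
            List.countP_eq_length_filter]
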